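-- pv_equiv track=rewrite | github.com/AKleriX/codewars-tasks | Letterss of Natac/task-solution.py | play_if_enough
-- ===== SOURCE A (Python) =====
-- from collections import Counter
--
-- def play_if_enough(hand, play):
--     hand_counts = Counter(hand)
--     play_counts = Counter(play)
--     if any(hand_counts[c] < n for c, n in play_counts.items()):
--         return False, hand
--     remaining = []
--     for ch in hand:
--         if play_counts[ch]:
--             play_counts[ch] -= 1
--         else:
--             remaining.append(ch)
--     return True, ''.join(remaining)
-- ===== SOURCE B (Python) =====
-- def play_if_enough(hand, play):
--     remaining = list(hand)
--     for ch in play: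
--         if ch in remaining:
--             remaining.remove(ch)
--         else:
--             return False, hand
--     return True, ''.join(remaining)
-- ===== Notes on version B (the rewrite author's own statement) =====
-- stated objective: simpler
-- what changed: Replaced the two Counters, the shortfall check and the counting pass over hand by a single loop over play that removes each letter's first occurrence from a mutable copy of hand, failing fast when a letter is missing.
import Mathlib
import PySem

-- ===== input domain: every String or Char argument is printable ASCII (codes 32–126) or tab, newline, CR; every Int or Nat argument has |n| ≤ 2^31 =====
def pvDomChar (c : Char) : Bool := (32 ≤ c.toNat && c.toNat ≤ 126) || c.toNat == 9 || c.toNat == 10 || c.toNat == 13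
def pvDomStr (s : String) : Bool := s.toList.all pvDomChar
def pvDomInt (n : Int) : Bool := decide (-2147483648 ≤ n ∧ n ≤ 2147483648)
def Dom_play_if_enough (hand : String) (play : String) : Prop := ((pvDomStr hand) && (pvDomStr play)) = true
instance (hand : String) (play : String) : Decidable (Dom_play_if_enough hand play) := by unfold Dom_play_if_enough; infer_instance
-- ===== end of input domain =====

-- B replaces A's Counter bookkeeping by removing each play letter's first occurrence
-- from a copy of hand (simpler; same return values, no speed claim).

-- ===== PORT A =====
def play_if_enough (hand : String) (play : String) : Bool × String :=
  let hand_counts := PySem.Dict.counter hand.toList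
  let play_counts := PySem.Dict.counter play.toList
  if play_counts.items.any (fun cn => hand_counts.getD cn.1 0 < cn.2) then
    (false, hand)
  else
    -- the for-loop over hand with state (play_counts, remaining)
    let res := hand.toList.foldl
      (fun (st : PySem.Dict Char Int × List Char) ch =>
        if st.1.getD ch 0 ≠ 0 then (st.1.insert ch (st.1.getD ch 0 - 1), st.2)
        else (st.1, st.2 ++ [ch]))
      (play_counts, ([] : List Char))
    (true, String.mk res.2)

-- ===== PORT B =====
-- 'remaining.remove(ch)' after the membership check is exactly List.erase (first occurrence)
def playRemoveAll : List Char → List Char → Option (List Char)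
  | rem, [] => some rem
  | rem, ch :: rest => if ch ∈ rem then playRemoveAll (rem.erase ch) rest else none

def play_if_enough_alt (hand : String) (play : String) : Bool × String :=
  match playRemoveAll hand.toList play.toList with
  | some remaining => (true, String.mk remaining)
  | none => (false, hand)

-- ===== PRECONDITION & SPEC =====
def Spec_play_if_enough (hand : String) (play : String) (out : Bool × String) : Prop := out = play_if_enough_alt hand play
instance (hand : String) (play : String) (out : Bool × String) : Decidable (Spec_play_if_enough hand play out) := by unfold Spec_play_if_enough; infer_instance

-- ===== CLAIM (what is proved, stated in full; the proofs are below) =====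
def Claim_equal_play_if_enough : Prop := ∀ (hand : String) (play : String), Dom_play_if_enough hand play → Spec_play_if_enough hand play (play_if_enough hand play)

-- ===== LEMMAS AND PROOFS =====

-- the residual of hand after deleting, per character c, its first (cnt c) occurrences
def pvStrip : (Char → Nat) → List Char → List Char
  | _, [] => []
  | cnt, h :: t =>
    if cnt h ≠ 0 then pvStrip (Function.update cnt h (cnt h - 1)) t
    else h :: pvStrip cnt t

theorem pvStrip_zero (l : List Char) : pvStrip (fun _ => 0) l = l := by
  induction l with
  | nil => rfl
  | cons h t ih =>
    simp only [pvStrip, ne_eq, not_true_eq_false, if_false]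
    exact congrArg (h :: ·) ih

theorem pvStrip_bump (c : Char) (cnt : Char → Nat) (rem : List Char) :
    pvStrip (Function.update cnt c (cnt c + 1)) rem = pvStrip cnt (rem.erase c) := by
  induction rem generalizing cnt with
  | nil => rfl
  | cons h t ih =>
    by_cases hc : h = c
    · subst hc
      simp only [pvStrip, Function.update_self, Nat.add_sub_cancel, ne_eq,
        Nat.succ_ne_zero, not_false_eq_true, if_pos, List.erase_cons_head]
      have : Function.update (Function.update cnt h (cnt h + 1)) h (cnt h) = cnt := by
        funext d; by_cases hd : d = h <;> simp [Function.update, hd]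
      rw [this]
    · have herase : (h :: t).erase c = h :: t.erase c := by
        rw [List.erase_cons, if_neg (by simpa using hc)]
      have hup : Function.update cnt c (cnt c + 1) h = cnt h := by
        simp [Function.update, hc]
      rw [herase]
      by_cases hz : cnt h = 0
      · simp only [pvStrip, hup, hz, ne_eq, not_true_eq_false, if_false]
        exact congrArg (h :: ·) (ih cnt)
      · simp only [pvStrip, hup, ne_eq, hz, not_false_eq_true, if_pos]
        have hcomm : Function.update (Function.update cnt c (cnt c + 1)) h (cnt h - 1)
            = Function.update (Function.update cnt h (cnt h - 1)) c
                ((Function.update cnt h (cnt h - 1)) c + 1) := by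
          funext d
          by_cases hdh : d = h
          · simp [Function.update, hdh, hc]
          · by_cases hdc : d = c <;> simp [Function.update, hdh, hdc, Ne.symm hc]
        rw [hcomm, ih]

-- B's removal loop succeeds exactly when play's counts fit, and yields pvStrip
theorem playRemoveAll_sufficient (play rem : List Char)
    (h : ∀ c, play.count c ≤ rem.count c) :
    playRemoveAll rem play = some (pvStrip (fun c => play.count c) rem) := by
  induction play generalizing rem with
  | nil =>
    simp only [playRemoveAll]
    rw [show (fun c => List.count c ([] : List Char)) = (fun _ => 0) from rfl, pvStrip_zero]
  | cons c cs ih =>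
    have hc : c ∈ rem := by
      have := h c
      simp only [List.count_cons, if_pos (beq_self_eq_true c)] at this
      exact List.count_pos_iff.mp (by omega)
    simp only [playRemoveAll, if_pos hc]
    have hcount : ∀ d, cs.count d ≤ (rem.erase c).count d := by
      intro d
      have h1 := h d
      have h2 : List.count d (rem.erase c) = List.count d rem - if c == d then 1 else 0 :=
        List.count_erase
      have h3 : List.count d (c :: cs) = List.count d cs + if c == d then 1 else 0 :=
        List.count_cons
      have h4 : 1 ≤ List.count c rem := List.count_pos_iff.mpr hc
      by_cases hdc : c = d
      · subst hdc; simp only [beq_self_eq_true, if_pos] at h2 h3; omega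
      · have : (c == d) = false := by simpa using hdc
        simp only [this] at h2 h3; omega
    rw [ih _ hcount]
    congr 1
    have hfun : (fun d => List.count d (c :: cs))
        = Function.update (fun d => List.count d cs) c (List.count c cs + 1) := by
      funext d
      by_cases hdc : d = c
      · subst hdc; simp [Function.update]
      · have : (c == d) = false := by simpa using (Ne.symm hdc)
        simp [List.count_cons, Function.update, hdc, this]
    rw [hfun, pvStrip_bump]

theorem playRemoveAll_insufficient (play rem : List Char)
    (h : ¬ ∀ c, play.count c ≤ rem.count c) :
    playRemoveAll rem play = none := by
  induction play generalizing rem with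
  | nil => exact absurd (fun c => Nat.zero_le _) h
  | cons c cs ih =>
    by_cases hc : c ∈ rem
    · simp only [playRemoveAll, if_pos hc]
      apply ih
      intro hall
      apply h
      intro d
      have h1 := hall d
      have h2 : List.count d (rem.erase c) = List.count d rem - if c == d then 1 else 0 :=
        List.count_erase
      have h3 : List.count d (c :: cs) = List.count d cs + if c == d then 1 else 0 :=
        List.count_cons
      have h4 : 1 ≤ List.count c rem := List.count_pos_iff.mpr hc
      by_cases hdc : c = d
      · subst hdc; simp only [beq_self_eq_true, if_pos] at h2 h3; omega
      · have : (c == d) = false := by simpa using hdc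
        simp only [this, Bool.false_eq_true, if_false] at h2 h3; omega
    · simp [playRemoveAll, hc]

-- A's for-loop computes pvStrip (through the Dict of remaining play counts)
theorem foldA_strip (l : List Char) (d : PySem.Dict Char Int) (f : Char → Nat)
    (acc : List Char) (hd : ∀ c, d.getD c 0 = (f c : Int)) :
    (l.foldl
      (fun (st : PySem.Dict Char Int × List Char) ch =>
        if st.1.getD ch 0 ≠ 0 then (st.1.insert ch (st.1.getD ch 0 - 1), st.2)
        else (st.1, st.2 ++ [ch])) (d, acc)).2 = acc ++ pvStrip f l := by
  induction l generalizing d f acc with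
  | nil => simp [pvStrip]
  | cons h t ih =>
    by_cases hz : f h = 0
    · have : d.getD h 0 = 0 := by rw [hd h, hz]; rfl
      simp only [List.foldl_cons, this, ne_eq, not_true_eq_false, if_false, pvStrip, hz]
      rw [ih _ f (acc ++ [h]) hd]
      simp
    · have hne : d.getD h 0 ≠ 0 := by
        rw [hd h]; exact_mod_cast hz
      simp only [List.foldl_cons, hne, if_pos, pvStrip, ne_eq, hz, not_false_eq_true]
      apply ih
      intro c
      rw [PySem.Dict.getD_insert]
      by_cases hch : c = h
      · subst hch
        rw [if_pos rfl, hd c]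
        have : 1 ≤ f c := Nat.one_le_iff_ne_zero.mpr hz
        simp [Function.update]
        omega
      · rw [if_neg hch, hd c]
        simp [Function.update, hch]

-- A's any-check is the negation of the count condition
theorem anyCheck_iff (hand play : List Char) :
    ((PySem.Dict.counter play).items.any
      (fun cn => (PySem.Dict.counter hand).getD cn.1 0 < cn.2)) = true
    ↔ ¬ ∀ c, play.count c ≤ hand.count c := by
  rw [PySem.Dict.items_counter]
  simp only [List.any_map, List.any_eq_true, Function.comp]
  constructor
  · rintro ⟨k, hk, hlt⟩ hall
    rw [PySem.Dict.getD_counter] at hlt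
    have := hall k
    simp only [decide_eq_true_eq] at hlt
    have : (List.count k hand : Int) < (List.count k play : Int) := hlt
    omega
  · intro hnot
    rcases not_forall.mp hnot with ⟨k, hk⟩
    refine ⟨k, ?_, ?_⟩
    · rw [PySem.Set.mem_ofList]
      by_contra hmem
      exact hk (le_trans (le_of_eq (List.count_eq_zero.mpr hmem)) (Nat.zero_le _))
    · rw [PySem.Dict.getD_counter]
      simp only [decide_eq_true_eq]
      exact_mod_cast Nat.lt_of_not_le hk

-- ===== VERDICT (by name: the statement is the Claim_ definition above) =====
theorem play_if_enough_spec : Claim_equal_play_if_enough := by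
  intro hand play _
  unfold Spec_play_if_enough play_if_enough play_if_enough_alt
  by_cases hcond : ∀ c, play.toList.count c ≤ hand.toList.count c
  · have hany : ((PySem.Dict.counter play.toList).items.any
        (fun cn => (PySem.Dict.counter hand.toList).getD cn.1 0 < cn.2)) = false := by
      rw [← Bool.not_eq_true, anyCheck_iff]
      exact not_not_intro hcond
    simp only [hany, Bool.false_eq_true, if_false,
      playRemoveAll_sufficient play.toList hand.toList hcond]
    rw [foldA_strip _ _ (fun c => play.toList.count c) []
      (fun c => PySem.Dict.getD_counter play.toList c)]
    simp
  · have hany : ((PySem.Dict.counter play.toList).items.any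
        (fun cn => (PySem.Dict.counter hand.toList).getD cn.1 0 < cn.2)) = true :=
      (anyCheck_iff hand.toList play.toList).mpr hcond
    simp only [hany, if_pos, playRemoveAll_insufficient play.toList hand.toList hcond]
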